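-- pv_equiv track=rewrite | github.com/mdandre89/Codewars-exercises | even-binary-sorting/even-binary-sorting.py | even_binary
-- ===== SOURCE A (Python) =====
-- def even_binary(n):
--     array = n.split(" ")
--     filtered_array = filter(lambda x: (x[-1] == '0'), array)
--     sorted_array = sorted(filtered_array, key=lambda x: int(x, 2))
--
--     i = 0
--     s = ''
--     for item in array:
--         if item[-1] == '0':
--             s += sorted_array[i] + ' '
--             i+=1
--         else:
--             s += item + ' '
--     return s.strip()
-- ===== SOURCE B (Python) =====
-- def even_binary(n):
--     # One pass with a shrinking pool: no sort call; at each even slot take the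
--     # minimum-valued token still in the pool (repeated first-min extraction).
--     arr = n.split(" ")
--     pool = [x for x in arr if x[-1] == '0']
--     out = []
--     for t in arr:
--         if t[-1] == '0':
--             m = min(pool, key=lambda x: int(x, 2))
--             pool.remove(m)
--             out.append(m)
--         else:
--             out.append(t)
--     return " ".join(out)
-- ===== Notes on version B (the rewrite author's own statement) =====
-- stated objective: alternative
-- what changed: Replaces A's filter + sorted() + counter-threaded string rebuild (+= and final .strip()) by a sort-free single pass: keep a shrinking pool of the even tokens and at each even slot extract the minimum-valued token from the pool (repeated first-min selection), then join once.
-- outside the precondition, e.g. on even_binary('\t10 1'): A returns '10 1', B returns '\t10 1'; on even_binary('10 1\t'): A returns '10 1', B returns '10 1\t'; on even_binary('\t1 10'): A returns '1 10', B returns '\t1 10'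
import Mathlib
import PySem

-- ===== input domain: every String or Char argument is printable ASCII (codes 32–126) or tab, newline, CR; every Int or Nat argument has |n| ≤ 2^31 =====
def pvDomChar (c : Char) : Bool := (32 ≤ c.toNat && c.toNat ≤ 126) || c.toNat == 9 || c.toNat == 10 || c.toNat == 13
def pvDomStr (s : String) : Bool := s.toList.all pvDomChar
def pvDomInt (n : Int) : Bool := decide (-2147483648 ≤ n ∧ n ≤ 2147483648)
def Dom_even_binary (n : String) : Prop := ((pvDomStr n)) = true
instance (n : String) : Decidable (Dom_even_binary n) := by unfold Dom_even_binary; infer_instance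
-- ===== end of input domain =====

-- B replaces A's filter + sort + counter-threaded string rebuild by a sort-free single pass that
-- extracts the minimum-valued even token from a shrinking pool at each even slot, then joins once
-- (objective: alternative); equivalence is about the return value only.

-- shared helpers: the even-token test (last character a binary zero) and the sort key int(x, 2)
def pTok (t : List Char) : Bool := PySem.List.pyGet? t (-1) == some '0'
def pyKey (t : List Char) : Int := (PySem.Int.ofCharsBase? t 2).getD 0

-- ===== PORT A =====
def even_binary (n : String) : String :=
  let array := PySem.Chars.splitOn n.toList [' ']
  let filtered := array.filter pTok
  let sortedArray := PySem.List.sorted filtered pyKey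
  let r := array.foldl (fun (st : Nat × List Char) item =>
      if pTok item then (st.1 + 1, st.2 ++ (PySem.List.pyGet? sortedArray (st.1 : Int)).getD [] ++ [' '])
      else (st.1, st.2 ++ item ++ [' '])) (0, [])
  String.ofList (PySem.Chars.strip r.2)

-- ===== PORT B =====
-- the loop step: state is (pool, out); min(pool, key=…) = PySem.List.min?, pool.remove(m) = remove?.
-- The 'none' branch is Python's ValueError (min of an empty pool); it is unreachable, since the pool
-- starts with every even token and the loop removes one per even token.
def bStep (st : List (List Char) × List (List Char)) (t : List Char) :
    List (List Char) × List (List Char) :=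
  if pTok t then
    match PySem.List.min? st.1 pyKey with
    | none => (st.1, st.2)
    | some m => ((PySem.List.remove? st.1 m).getD st.1, st.2 ++ [m])
  else (st.1, st.2 ++ [t])

def even_binary_alt (n : String) : String :=
  let arr := PySem.Chars.splitOn n.toList [' ']
  let pool := arr.filter pTok
  let r := arr.foldl bStep (pool, [])
  String.ofList (PySem.Chars.join [' '] r.2)

-- ===== PRECONDITION & SPEC =====
-- Pre_ excludes (a) inputs on which A raises: an empty token (IndexError from x[-1]) or an
-- even-looking token int(·, 2) rejects (ValueError), and (b) a defensible corner on which A's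
-- final .strip() accidentally eats token-internal whitespace: a zero-ending token that starts
-- with whitespace, a first token starting with whitespace, or a last token ending in whitespace —
-- there A strips those characters while B keeps the tokens intact.
def Pre_even_binary (n : String) : Prop :=
  (let toks := PySem.Chars.splitOn n.toList [' ']
   toks.all (fun t => !t.isEmpty) &&
   toks.all (fun t => !pTok t ||
     ((PySem.Int.ofCharsBase? t 2).isSome && t.head?.all (fun c => !PySem.Chars.isspace c))) &&
   toks.headI.head?.all (fun c => !PySem.Chars.isspace c) &&
   (toks.getLast?.bind List.getLast?).all (fun c => !PySem.Chars.isspace c)) = true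
instance (n : String) : Decidable (Pre_even_binary n) := by unfold Pre_even_binary; infer_instance

def pvWitness_even_binary : String := "100 1 10 1011 1110"

def Spec_even_binary (n : String) (out : String) : Prop := out = even_binary_alt n
instance (n : String) (out : String) : Decidable (Spec_even_binary n out) := by
  unfold Spec_even_binary; infer_instance

-- ===== CLAIM (what is proved, stated in full; the proofs are below) =====
def Claim_equal_even_binary : Prop :=
  ∀ (n : String), Dom_even_binary n → Pre_even_binary n → Spec_even_binary n (even_binary n)

-- ===== LEMMAS AND PROOFS =====

-- substitution along the token list: replace successive pTok-tokens by successive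
-- replacement tokens (both ports' results reduce to this common shape)
def subst : List (List Char) → List (List Char) → List (List Char)
  | _, [] => []
  | [], t :: ts => t :: subst [] ts
  | e :: es, t :: ts => if pTok t then e :: subst es ts else t :: subst (e :: es) ts

theorem subst_nil (ts : List (List Char)) : subst [] ts = ts := by
  induction ts with
  | nil => rfl
  | cons t ts ih => simp [subst, ih]

theorem subst_cons_neg (es : List (List Char)) (t : List Char) (ts : List (List Char))
    (h : pTok t = false) : subst es (t :: ts) = t :: subst es ts := by
  cases es with
  | nil => simp [subst_nil]
  | cons e es => simp [subst, h]

theorem subst_eq_nil_iff (es ts : List (List Char)) : subst es ts = [] ↔ ts = [] := by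
  cases ts with
  | nil => simp [subst]
  | cons t ts =>
      cases es with
      | nil => simp [subst]
      | cons e es => simp only [subst]; split <;> simp

theorem subst_mem {u : List Char} : ∀ (es ts : List (List Char)),
    u ∈ subst es ts → u ∈ es ∨ u ∈ ts := by
  intro es ts
  induction ts generalizing es with
  | nil => simp [subst]
  | cons t ts ih =>
      cases es with
      | nil => rw [subst_nil]; exact fun h => Or.inr h
      | cons e es =>
          simp only [subst]
          split
          · intro h
            rcases List.mem_cons.mp h with rfl | h
            · simp
            · rcases ih es h with h' | h' <;> simp [h']
          · intro h
            rcases List.mem_cons.mp h with rfl | h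
            · simp
            · rcases ih (e :: es) h with h' | h' <;> simp_all

theorem subst_head {u : List Char} (es ts : List (List Char))
    (h : (subst es ts).head? = some u) : u ∈ es ∨ ts.head? = some u := by
  cases ts with
  | nil => simp [subst] at h
  | cons t ts =>
      cases es with
      | nil => rw [subst_nil] at h; exact Or.inr h
      | cons e es =>
          simp only [subst] at h
          split at h
          · simp at h; subst h; simp
          · simp at h; subst h; simp

theorem getLast?_cons_ne {α : Type} (a : α) (l : List α) (h : l ≠ []) :
    (a :: l).getLast? = l.getLast? := by
  rcases hx : l.getLast? with _ | x
  · exact absurd (List.getLast?_eq_none_iff.mp hx) h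
  · rw [List.getLast?_cons, hx]; rfl

theorem subst_getLast {u : List Char} : ∀ (es ts : List (List Char)),
    (∀ e ∈ es, pTok e = true) → ts ≠ [] →
    (subst es ts).getLast? = some u → pTok u = true ∨ ts.getLast? = some u := by
  intro es ts
  induction ts generalizing es with
  | nil => simp
  | cons t ts ih =>
      intro hes _ h
      obtain ⟨x, es', hstep, hx, hes'⟩ :
          ∃ x es', subst es (t :: ts) = x :: subst es' ts ∧
            (pTok x = true ∨ x = t) ∧ (∀ e ∈ es', pTok e = true) := by
        cases es with
        | nil => exact ⟨t, [], by rw [subst_nil, subst_nil], Or.inr rfl, by simp⟩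
        | cons e es0 =>
            by_cases hp : pTok t
            · exact ⟨e, es0, by simp only [subst, hp, if_pos], Or.inl (hes e (by simp)),
                fun e' he' => hes e' (by simp [he'])⟩
            · exact ⟨t, e :: es0, by simp only [subst, hp]; simp, Or.inr rfl, hes⟩
      cases ts with
      | nil =>
          rw [hstep] at h
          have hxu : x = u := by simpa [subst] using h
          subst hxu
          rcases hx with hx | hx
          · exact Or.inl hx
          · subst hx; simp
      | cons t' ts' =>
          rw [hstep] at h
          have hne : subst es' (t' :: ts') ≠ [] := by rw [Ne, subst_eq_nil_iff]; simp
          rw [getLast?_cons_ne _ _ hne] at h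
          rcases ih es' hes' (by simp) h with h' | h'
          · exact Or.inl h'
          · right; rwa [getLast?_cons_ne _ _ (by simp)]

theorem pyGet?_neg_one {α : Type} (l : List α) : PySem.List.pyGet? l (-1) = l.getLast? := by
  rcases l with _ | ⟨a, t⟩
  · rfl
  · simp [PySem.List.pyGet?, PySem.List.pyIdx?, List.getLast?_eq_getElem?]

theorem pyGet?_natCast' {α : Type} (l : List α) (k : Nat) (h : k < l.length) :
    PySem.List.pyGet? l (k : Int) = some l[k] := by
  simp [PySem.List.pyGet?, PySem.List.pyIdx?, h]

-- ---- stable-sort decomposition: sorted xs = (first minimum) :: sorted (xs minus that minimum) ----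

theorem sorted_append_singleton {α : Type} (key : α → Int) (xs : List α) (x : α) :
    PySem.List.sorted (xs ++ [x]) key
      = PySem.List.insertBy (fun a b => decide (key a < key b)) x (PySem.List.sorted xs key) := by
  rw [PySem.List.sorted_eq_foldl_insertBy, PySem.List.sorted_eq_foldl_insertBy, List.foldl_append]
  rfl

theorem min?_append_singleton {α : Type} (key : α → Int) (xs : List α) (x : α) :
    PySem.List.min? (xs ++ [x]) key
      = match PySem.List.min? xs key with
        | none => some x
        | some m => if key x < key m then some x else some m := by
  unfold PySem.List.min?
  rw [List.foldl_append]
  rfl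

theorem insertBy_head_lt {α : Type} (key : α → Int) (x : α) (l : List α)
    (h : ∀ y ∈ l, key x < key y) :
    PySem.List.insertBy (fun a b => decide (key a < key b)) x l = x :: l := by
  cases l with
  | nil => rfl
  | cons y ys => simp [PySem.List.insertBy, h y (by simp)]

theorem insertBy_cons_not_lt {α : Type} (key : α → Int) (x y : α) (ys : List α)
    (h : ¬ key x < key y) :
    PySem.List.insertBy (fun a b => decide (key a < key b)) x (y :: ys)
      = y :: PySem.List.insertBy (fun a b => decide (key a < key b)) x ys := by
  simp [PySem.List.insertBy, h]

theorem sorted_min_decomp {α : Type} [BEq α] [LawfulBEq α] (key : α → Int) : ∀ (xs : List α) (m : α),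
    PySem.List.min? xs key = some m →
    PySem.List.sorted xs key = m :: PySem.List.sorted (xs.erase m) key := by
  intro xs
  induction xs using List.reverseRecOn with
  | nil => intro m h; simp [PySem.List.min?] at h
  | append_singleton xs x ih =>
      intro m h
      rw [min?_append_singleton] at h
      rcases hmin : PySem.List.min? xs key with _ | m0
      · -- xs has no minimum, so xs = []
        have hx : xs = [] := (PySem.List.min?_eq_none_iff xs key).mp hmin
        rw [hmin] at h
        simp only at h
        injection h with h'
        subst hx
        rw [← h']
        simp [PySem.List.sorted, PySem.List.insertBy]
      · rw [hmin] at h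
        simp only at h
        by_cases hlt : key x < key m0
        · -- the new element is strictly smaller than everything in xs
          rw [if_pos hlt] at h
          injection h with h'
          rw [← h']
          have hstrict : ∀ y ∈ xs, key x < key y := by
            intro y hy
            exact lt_of_lt_of_le hlt (PySem.List.min?_isMin hmin y hy)
          have hnotmem : x ∉ xs := fun hc => lt_irrefl _ (hstrict x hc)
          rw [sorted_append_singleton, insertBy_head_lt key x _
            (fun y hy => hstrict y ((PySem.List.mem_sorted xs key false y).mp hy))]
          rw [List.erase_append_right _ hnotmem]
          simp
        · -- the minimum of xs survives
          rw [if_neg hlt] at h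
          injection h with h'
          rw [← h']
          have hmem : m0 ∈ xs := PySem.List.min?_mem hmin
          rw [sorted_append_singleton, ih m0 hmin,
            insertBy_cons_not_lt key x m0 _ hlt,
            List.erase_append_left _ hmem,
            sorted_append_singleton]

-- ---- B's loop produces subst (sorted pool) over the tokens ----

theorem bLoop (ts : List (List Char)) : ∀ (pool acc : List (List Char)),
    ts.countP pTok ≤ pool.length →
    (ts.foldl bStep (pool, acc)).2 = acc ++ subst (PySem.List.sorted pool pyKey) ts := by
  induction ts with
  | nil => intro pool acc _; simp [subst]
  | cons t ts ih =>
      intro pool acc hlen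
      by_cases hp : pTok t
      · have hpos : 0 < pool.length := by
          have : (t :: ts).countP pTok = ts.countP pTok + 1 := by simp [hp]
          omega
        have hne : pool ≠ [] := by
          intro hc; rw [hc] at hpos; simp at hpos
        obtain ⟨m, hm⟩ : ∃ m, PySem.List.min? pool pyKey = some m := by
          cases hmin : PySem.List.min? pool pyKey with
          | none => exact absurd ((PySem.List.min?_eq_none_iff pool pyKey).mp hmin) hne
          | some m => exact ⟨m, rfl⟩
        have hmem : m ∈ pool := PySem.List.min?_mem hm
        have hrem : (PySem.List.remove? pool m).getD pool = pool.erase m := by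
          rw [PySem.List.remove?_eq_some_erase pool m hmem]; rfl
        simp only [List.foldl_cons, bStep, hp, if_pos, hm, hrem]
        have hlen' : ts.countP pTok ≤ (pool.erase m).length := by
          rw [List.length_erase_of_mem hmem]
          have : (t :: ts).countP pTok = ts.countP pTok + 1 := by simp [hp]
          omega
        rw [ih _ _ hlen', sorted_min_decomp pyKey pool m hm]
        simp only [subst, hp, if_pos, List.append_assoc, List.singleton_append]
      · simp only [List.foldl_cons, bStep, hp, Bool.false_eq_true, if_false]
        rw [ih _ _ (by simp [hp] at hlen ⊢; omega)]
        rw [subst_cons_neg _ _ _ (by simpa using hp)]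
        simp

-- ---- the rebuild loop of A produces subst, each token with a trailing blank ----

theorem render (sortedA : List (List Char)) : ∀ (ts : List (List Char)) (i : Nat)
    (acc : List Char), i + ts.countP pTok ≤ sortedA.length →
    (ts.foldl (fun (st : Nat × List Char) item =>
        if pTok item then (st.1 + 1, st.2 ++ (PySem.List.pyGet? sortedA (st.1 : Int)).getD [] ++ [' '])
        else (st.1, st.2 ++ item ++ [' '])) (i, acc)).2
    = acc ++ ((subst (sortedA.drop i) ts).map (· ++ [' '])).flatten := by
  intro ts
  induction ts with
  | nil => intro i acc _; simp [subst]
  | cons t ts ih =>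
      intro i acc hlen
      by_cases hp : pTok t
      · have hcount : ts.countP pTok + 1 = (t :: ts).countP pTok := by
          simp [hp]
        have hi : i < sortedA.length := by omega
        have hdrop : sortedA.drop i = sortedA[i] :: sortedA.drop (i + 1) := by
          rw [List.drop_eq_getElem_cons hi]
        simp only [List.foldl_cons, hp, if_pos]
        rw [pyGet?_natCast' sortedA i hi]
        rw [ih (i + 1) _ (by omega)]
        rw [hdrop]
        simp [subst, hp]
      · simp only [List.foldl_cons, hp, Bool.false_eq_true, if_false]
        rw [ih i _ (by simp [hp] at hlen; omega)]
        rw [subst_cons_neg _ _ _ (by simpa using hp)]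
        simp

theorem flatten_eq_join : ∀ (ts : List (List Char)), ts ≠ [] →
    ((ts.map (· ++ [' '])).flatten) = PySem.Chars.join [' '] ts ++ [' '] := by
  intro ts
  induction ts with
  | nil => simp
  | cons u ts ih =>
      intro _
      cases ts with
      | nil => simp [PySem.Chars.join_singleton]
      | cons v ts' =>
          rw [PySem.Chars.join_cons_cons]
          simp only [List.map_cons, List.flatten_cons]
          have := ih (by simp)
          simp only [List.map_cons, List.flatten_cons] at this
          rw [this]
          simp

theorem join_head (u : List Char) (ts : List (List Char)) (hu : u ≠ []) :
    (PySem.Chars.join [' '] (u :: ts)).head? = u.head? := by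
  cases ts with
  | nil => rw [PySem.Chars.join_singleton]
  | cons v ts' =>
      rw [PySem.Chars.join_cons_cons, List.append_assoc, List.head?_append_of_ne_nil _ hu]

theorem join_getLast : ∀ (ts : List (List Char)) (u : List Char),
    ts.getLast? = some u → u ≠ [] → (∀ w ∈ ts, w ≠ []) →
    (PySem.Chars.join [' '] ts).getLast? = u.getLast? := by
  intro ts
  induction ts with
  | nil => simp
  | cons w ts ih =>
      intro u hlast hu hne
      cases ts with
      | nil =>
          simp at hlast
          rw [PySem.Chars.join_singleton, hlast]
      | cons v ts' =>
          rw [getLast?_cons_ne _ _ (by simp)] at hlast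
          have hj := ih u hlast hu (by intro w hw; exact hne w (by simp [hw]))
          have hjoin_ne : PySem.Chars.join [' '] (v :: ts') ≠ [] := by
            intro hc
            rw [hc] at hj
            simp [List.getLast?_eq_getElem?] at hj
            exact hu (by simpa [← List.length_eq_zero_iff] using hj.symm ▸ rfl)
          rw [PySem.Chars.join_cons_cons, List.append_assoc, List.getLast?_append]
          rw [List.getLast?_append]
          rw [hj]
          have : u.getLast? ≠ none := by
            simp [List.getLast?_eq_getElem?, hu]
          cases hul : u.getLast? with
          | none => exact absurd hul this
          | some c => simp

theorem strip_final (ts : List (List Char)) (h1 : ∀ u ∈ ts, u ≠ [])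
    (hh : ∀ c, (ts.headI).head? = some c → PySem.Chars.isspace c = false)
    (hl : ∀ u c, ts.getLast? = some u → u.getLast? = some c → PySem.Chars.isspace c = false) :
    PySem.Chars.strip ((ts.map (· ++ [' '])).flatten) = PySem.Chars.join [' '] ts := by
  cases ts with
  | nil => rfl
  | cons u rest =>
      have hu : u ≠ [] := h1 u (by simp)
      rw [flatten_eq_join _ (by simp)]
      have hhead : (PySem.Chars.join [' '] (u :: rest) ++ [' ']).head? = u.head? := by
        have := join_head u rest hu
        rcases hj : PySem.Chars.join [' '] (u :: rest) with _ | ⟨a, l⟩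
        · rw [hj] at this; simp at this
          exact absurd this.symm (by simp [List.head?_eq_none_iff, hu])
        · rw [hj] at this; simpa using this
      obtain ⟨c, hc⟩ : ∃ c, u.head? = some c := by
        cases u with
        | nil => exact absurd rfl hu
        | cons a _ => exact ⟨a, rfl⟩
      have hcws : PySem.Chars.isspace c = false := hh c (by simpa using hc)
      have hlstrip : PySem.Chars.lstrip (PySem.Chars.join [' '] (u :: rest) ++ [' '])
          = PySem.Chars.join [' '] (u :: rest) ++ [' '] := by
        rcases hx : PySem.Chars.join [' '] (u :: rest) ++ [' '] with _ | ⟨a, l⟩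
        · simp at hx
        · rw [hx] at hhead
          have : a = c := by rw [hc] at hhead; simpa using hhead
          simp [PySem.Chars.lstrip, this, hcws]
      obtain ⟨v, hv⟩ : ∃ v, (u :: rest).getLast? = some v := ⟨_, List.getLast?_cons⟩
      have hvne : v ≠ [] := h1 v (List.mem_of_getLast? hv)
      obtain ⟨d, hd⟩ : ∃ d, v.getLast? = some d := by
        cases hvl : v.getLast? with
        | none => exact absurd (by simpa [List.getLast?_eq_none_iff] using hvl) hvne
        | some d => exact ⟨d, rfl⟩
      have hdws : PySem.Chars.isspace d = false := hl v d hv hd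
      have hjl : (PySem.Chars.join [' '] (u :: rest)).getLast? = some d := by
        rw [join_getLast (u :: rest) v hv hvne h1, hd]
      unfold PySem.Chars.strip
      rw [hlstrip]
      unfold PySem.Chars.rstrip
      rw [List.reverse_append]
      simp only [List.reverse_cons, List.reverse_nil, List.nil_append, List.singleton_append]
      rw [List.dropWhile_cons]
      have hsp : PySem.Chars.isspace ' ' = true := by decide
      simp only [hsp, if_pos]
      rcases hr : (PySem.Chars.join [' '] (u :: rest)).reverse with _ | ⟨a, l⟩
      · simp at hr
        rw [hr] at hjl; simp at hjl
      · have : a = d := by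
          have := List.head?_reverse (l := PySem.Chars.join [' '] (u :: rest))
          rw [hr] at this
          simp only [List.head?_cons] at this
          rw [hjl] at this
          exact Option.some.inj this
        rw [List.dropWhile_cons]
        simp only [this, hdws, Bool.false_eq_true, if_false]
        rw [← this, ← hr, List.reverse_reverse]

-- elements produced by sorting the filtered tokens are pTok-tokens of the original list
theorem mem_sorted_filter {u : List Char} (toks : List (List Char))
    (h : u ∈ PySem.List.sorted (toks.filter pTok) pyKey) : pTok u = true ∧ u ∈ toks := by
  have := (PySem.List.sorted_perm (toks.filter pTok) pyKey false).mem_iff.mp h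
  exact ⟨(List.mem_filter.mp this).2, (List.mem_filter.mp this).1⟩

-- ===== VERDICT (by name: the statement is the Claim_ definition above) =====
theorem even_binary_spec : Claim_equal_even_binary := by
  intro n _ hpre
  unfold Spec_even_binary even_binary even_binary_alt
  simp only []
  set toks := PySem.Chars.splitOn n.toList [' '] with htoks
  unfold Pre_even_binary at hpre
  rw [← htoks] at hpre
  simp only [Bool.and_eq_true, List.all_eq_true, Bool.or_eq_true, Bool.not_eq_eq_eq_not,
    Bool.not_true, Option.all_eq_true] at hpre
  obtain ⟨⟨⟨hne, heven⟩, hhead⟩, hlast⟩ := hpre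
  set sortedA := PySem.List.sorted (toks.filter pTok) pyKey with hsA
  have hcount : toks.countP pTok ≤ (toks.filter pTok).length := by
    rw [List.countP_eq_length_filter]
  have hlenA : toks.countP pTok ≤ sortedA.length := by
    rw [hsA, (PySem.List.sorted_perm (toks.filter pTok) pyKey false).length_eq]
    exact hcount
  have hB := bLoop toks (toks.filter pTok) [] hcount
  have hrender := render sortedA toks 0 [] (by simpa using hlenA)
  simp only [List.drop_zero, List.nil_append] at hrender
  simp only [List.nil_append] at hB
  rw [hrender, hB, ← hsA]
  congr 1
  have hmem : ∀ u ∈ subst sortedA toks, u ∈ toks := by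
    intro u hu
    rcases subst_mem sortedA toks hu with h | h
    · exact (mem_sorted_filter toks (hsA ▸ h)).2
    · exact h
  have hne' : ∀ u ∈ subst sortedA toks, u ≠ [] := by
    intro u hu
    have := hne u (hmem u hu)
    simpa [List.isEmpty_iff] using this
  apply strip_final _ hne'
  · intro c hc
    rcases hsub : subst sortedA toks with _ | ⟨u, rest⟩
    · rw [hsub] at hc
      rw [show ([] : List (List Char)).headI = [] from rfl] at hc
      simp at hc
    · rw [hsub] at hc
      simp only [List.headI_cons] at hc
      have hu : (subst sortedA toks).head? = some u := by rw [hsub]; rfl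
      rcases subst_head sortedA toks hu with h | h
      · have hp := mem_sorted_filter toks (hsA ▸ h)
        rcases heven u hp.2 with hf | hgood
        · rw [hp.1] at hf; cases hf
        · exact hgood.2 c hc
      · have hhu : toks.headI = u := by
          obtain ⟨ys, hys⟩ := List.head?_eq_some_iff.mp h
          rw [hys]; rfl
        exact hhead c (by rw [hhu]; exact hc)
  · intro u c hu hc
    have htoksne : toks ≠ [] := by
      intro hcn
      rw [hcn] at hu; simp [subst] at hu
    have hes : ∀ e ∈ sortedA, pTok e = true := fun e he => (mem_sorted_filter toks (hsA ▸ he)).1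
    rcases subst_getLast sortedA toks hes htoksne hu with h | h
    · unfold pTok at h
      rw [pyGet?_neg_one] at h
      simp only [beq_iff_eq] at h
      rw [h] at hc
      cases hc; decide
    · have := hlast c (by rw [h]; simpa using hc)
      simpa using this
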